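-- pv_equiv track=rewrite | github.com/DreamTeamSE/SutureService | index.py | minimize_total_effort
-- ===== SOURCE A (Python) =====
-- def minimize_total_effort(effort):
--     # Sort the array for efficient checking of smallest divisors
--     sorted_effort = sorted(effort)
--
--     # Create a new list for the transformed efforts
--     minimized = []
--
--     # For each element, find the smallest divisor in the sorted array
--     for value in effort:
--         for candidate in sorted_effort:
--             # Check if candidate divides value
--             if value % candidate == 0:
--                 minimized.append(candidate)
--                 break
--
--     # Calculate and return the sum of minimized efforts
--     return sum(minimized)
-- ===== SOURCE B (Python) =====
-- def minimize_total_effort(effort):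
--     # For each value, the smallest array element dividing it is found by
--     # enumerating divisors of |value| up to its square root and checking
--     # membership in a hash set, instead of scanning the sorted array.
--     s = set(effort)
--     total = 0
--     for v in effort:
--         if v == 0:
--             total += min(s)
--         else:
--             a = -v if v < 0 else v
--             best = None
--             d = 1
--             while d * d <= a:
--                 if a % d == 0:
--                     for c in (-(a // d), -d, d, a // d):
--                         if c in s and (best is None or c < best):
--                             best = c
--                 d += 1
--             total += best
--     return total
-- ===== Notes on version B (the rewrite author's own statement) =====
-- stated objective: faster
-- what changed: Instead of scanning the sorted array for each element until a divisor is found (quadratic nested scans), B builds a hash set of the elements once and, for each value, enumerates the divisors of |value| up to its square root, keeping the smallest (possibly negative) divisor present in the set.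
import Mathlib
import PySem

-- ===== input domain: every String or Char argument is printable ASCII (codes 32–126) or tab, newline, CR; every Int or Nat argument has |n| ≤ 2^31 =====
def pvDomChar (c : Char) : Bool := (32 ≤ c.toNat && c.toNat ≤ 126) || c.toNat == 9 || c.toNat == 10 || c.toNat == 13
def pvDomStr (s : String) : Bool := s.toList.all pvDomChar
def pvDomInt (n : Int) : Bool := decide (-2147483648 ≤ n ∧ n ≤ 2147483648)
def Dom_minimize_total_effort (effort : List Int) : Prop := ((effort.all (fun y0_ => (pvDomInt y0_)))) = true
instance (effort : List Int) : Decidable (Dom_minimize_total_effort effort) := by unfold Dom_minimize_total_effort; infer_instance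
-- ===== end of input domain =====

-- B replaces A's per-element scan of the sorted array by divisor enumeration of |v| up to
-- its square root with membership tests in a set of the elements (objective: alternative).

-- ===== PORT A =====
-- inner loop 'for candidate in sorted_effort: if value % candidate == 0: append; break'
def pvFirstDiv (v : Int) : List Int → Option Int
  | [] => none
  | c :: rest => if PySem.Int.mod v c = 0 then some c else pvFirstDiv v rest


def minimize_total_effort (effort : List Int) : Int :=
  let sorted_effort := PySem.List.sorted effort (fun x => x) false
  let minimized := effort.foldl (fun acc v =>
      match pvFirstDiv v sorted_effort with
      | some c => acc ++ [c]
      | none => acc) ([] : List Int)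
  minimized.sum

-- ===== PORT B =====
-- 'if c in s and (best is None or c < best): best = c'
def pvUpd (s : PySem.Set Int) (best : Option Int) (c : Int) : Option Int :=
  if PySem.Set.contains s c && (match best with | none => true | some b => decide (c < b)) then
    some c
  else best


-- 'while d * d <= a: if a % d == 0: … ; d += 1'
def pvLoop (a : Int) (s : PySem.Set Int) (d : Int) (best : Option Int) : Option Int :=
  if d * d ≤ a then
    pvLoop a s (d + 1)
      (if PySem.Int.mod a d = 0 then
        [-(PySem.Int.floordiv a d), -d, d, PySem.Int.floordiv a d].foldl (pvUpd s) best
      else best)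
  else best
termination_by (a + 1 - d).toNat
decreasing_by
  rename_i h
  have h1 : d ≤ a := by nlinarith [mul_self_nonneg d]
  omega


def minimize_total_effort_alt (effort : List Int) : Int :=
  let s := PySem.Set.ofList effort
  effort.foldl (fun total v =>
    if v = 0 then total + (PySem.List.min? s (fun x => x)).getD 0
    else
      let a := if v < 0 then -v else v
      total + (pvLoop a s 1 none).getD 0) 0

-- ===== PRECONDITION & SPEC =====
-- Pre_ excludes exactly the inputs on which A raises ZeroDivisionError: those where 0 is an
-- element and some element has no negative divisor in the list (the scan of the sorted
-- array then reaches candidate 0 before finding a divisor).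
def Pre_minimize_total_effort (effort : List Int) : Prop :=
  (0 : Int) ∈ effort → ∀ v ∈ effort, ∃ c ∈ effort, c < 0 ∧ c ∣ v
instance (effort : List Int) : Decidable (Pre_minimize_total_effort effort) := by
  unfold Pre_minimize_total_effort; infer_instance

def pvWitness_minimize_total_effort : List Int := [2, 3, 4]

def Spec_minimize_total_effort (effort : List Int) (out : Int) : Prop := out = minimize_total_effort_alt effort
instance (effort : List Int) (out : Int) : Decidable (Spec_minimize_total_effort effort out) := by unfold Spec_minimize_total_effort; infer_instance

-- ===== CLAIM (what is proved, stated in full; the proofs are below) =====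
def Claim_equal_minimize_total_effort : Prop := ∀ (effort : List Int), Dom_minimize_total_effort effort → Pre_minimize_total_effort effort → Spec_minimize_total_effort effort (minimize_total_effort effort)

-- ===== LEMMAS AND PROOFS =====

theorem pvFirstDiv_spec {v : Int} {l : List Int} (hp : l.Pairwise (· ≤ ·)) {c : Int}
    (h : pvFirstDiv v l = some c) :
    c ∈ l ∧ PySem.Int.mod v c = 0 ∧ ∀ x ∈ l, PySem.Int.mod v x = 0 → c ≤ x := by
  induction l with
  | nil => simp [pvFirstDiv] at h
  | cons a t ih =>
    rw [List.pairwise_cons] at hp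
    simp only [pvFirstDiv] at h
    split at h
    · rename_i hd
      cases h
      refine ⟨List.mem_cons_self, hd, ?_⟩
      intro x hx _
      rcases List.mem_cons.1 hx with rfl | hx
      · exact le_refl _
      · exact hp.1 x hx
    · rename_i hd
      obtain ⟨hc1, hc2, hc3⟩ := ih hp.2 h
      refine ⟨List.mem_cons_of_mem _ hc1, hc2, ?_⟩
      intro x hx hm
      rcases List.mem_cons.1 hx with rfl | hx
      · exact absurd hm hd
      · exact hc3 x hx hm

theorem pvFirstDiv_isSome {v : Int} {l : List Int} {x : Int}
    (hx : x ∈ l) (hdvd : PySem.Int.mod v x = 0) : ∃ c, pvFirstDiv v l = some c := by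
  induction l with
  | nil => simp at hx
  | cons a t ih =>
    simp only [pvFirstDiv]
    split
    · exact ⟨a, rfl⟩
    · rename_i hd
      rcases List.mem_cons.1 hx with rfl | hx
      · exact absurd hdvd hd
      · exact ih hx


def pvIsM (v : Int) (l : List Int) (c : Int) : Prop :=
  c ∈ l ∧ c ≠ 0 ∧ c ∣ v ∧ ∀ x ∈ l, x ≠ 0 → x ∣ v → c ≤ x

theorem pvA_isM {effort : List Int} (hpre : Pre_minimize_total_effort effort)
    {v : Int} (hv : v ∈ effort) :
    ∃ c, pvFirstDiv v (PySem.List.sorted effort (fun x => x) false) = some c ∧ pvIsM v effort c := by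
  have hp : (PySem.List.sorted effort (fun x => x) false).Pairwise (· ≤ ·) :=
    PySem.List.sorted_pairwise effort (fun x => x)
  have hmem : ∀ x : Int, x ∈ PySem.List.sorted effort (fun x => x) false ↔ x ∈ effort := by
    intro x; exact PySem.List.mem_sorted effort (fun x => x) false x
  have hex : ∃ x ∈ PySem.List.sorted effort (fun x => x) false, PySem.Int.mod v x = 0 := by
    by_cases hv0 : v = 0
    · subst hv0
      obtain ⟨c, hc, _, _⟩ := hpre hv 0 hv
      exact ⟨c, (hmem c).2 hc, (PySem.Int.mod_eq_zero_iff_dvd 0 c).2 (dvd_zero c)⟩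
    · exact ⟨v, (hmem v).2 hv, (PySem.Int.mod_eq_zero_iff_dvd v v).2 dvd_rfl⟩
  obtain ⟨x, hx, hxm⟩ := hex
  obtain ⟨c, hc⟩ := pvFirstDiv_isSome hx hxm
  obtain ⟨hc1, hc2, hc3⟩ := pvFirstDiv_spec hp hc
  have hce : c ∈ effort := (hmem c).1 hc1
  have hcne : c ≠ 0 := by
    rintro rfl
    obtain ⟨n, hn, hnneg, hndvd⟩ := hpre hce v hv
    have := hc3 n ((hmem n).2 hn) ((PySem.Int.mod_eq_zero_iff_dvd v n).2 hndvd)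
    omega
  refine ⟨c, hc, hce, hcne, (PySem.Int.mod_eq_zero_iff_dvd v c).1 hc2, ?_⟩
  intro y hy _ hyd
  exact hc3 y ((hmem y).2 hy) ((PySem.Int.mod_eq_zero_iff_dvd v y).2 hyd)


theorem pvUpd_none (s : PySem.Set Int) (c : Int) (hc : c ∈ s) :
    pvUpd s none c = some c := by
  simp [pvUpd, PySem.Set.contains, hc]

theorem pvUpd_cases (s : PySem.Set Int) (best : Option Int) (c : Int) :
    (pvUpd s best c = best) ∨ (c ∈ s ∧ pvUpd s best c = some c ∧ ∀ b, best = some b → c < b) := by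
  cases best with
  | none =>
    by_cases hc : c ∈ s
    · exact Or.inr ⟨hc, pvUpd_none s c hc, by rintro b ⟨⟩⟩
    · exact Or.inl (by simp [pvUpd, PySem.Set.contains, hc])
  | some b0 =>
    by_cases hc : c ∈ s
    · by_cases hlt : c < b0
      · refine Or.inr ⟨hc, by simp [pvUpd, PySem.Set.contains, hc, hlt], ?_⟩
        rintro b hb; cases hb; exact hlt
      · exact Or.inl (by simp [pvUpd, PySem.Set.contains, hc, hlt])
    · exact Or.inl (by simp [pvUpd, PySem.Set.contains, hc])

theorem pvFoldUpd_spec (s : PySem.Set Int) (L : List Int) : ∀ (best : Option Int),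
    (∀ b, L.foldl (pvUpd s) best = some b → ((b ∈ L ∧ b ∈ s) ∨ best = some b)) ∧
    (∀ b x, L.foldl (pvUpd s) best = some b →
      ((x ∈ L ∧ x ∈ s) ∨ best = some x) → b ≤ x) ∧
    (L.foldl (pvUpd s) best = none → best = none ∧ ∀ x ∈ L, x ∉ s) := by
  induction L with
  | nil =>
    intro best
    refine ⟨by intro b h; exact Or.inr h, ?_, by intro h; exact ⟨h, by simp⟩⟩
    intro b x h hx
    rcases hx with ⟨hx, _⟩ | rfl
    · simp at hx
    · simp only [List.foldl_nil] at h; cases h; exact le_refl _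
  | cons a t ih =>
    intro best
    obtain ⟨ih1, ih2, ih3⟩ := ih (pvUpd s best a)
    have hfold : List.foldl (pvUpd s) best (a :: t) = List.foldl (pvUpd s) (pvUpd s best a) t := by
      simp
    refine ⟨?_, ?_, ?_⟩
    · intro b h
      rw [hfold] at h
      rcases ih1 b h with ⟨hbt, hbs⟩ | heq
      · exact Or.inl ⟨List.mem_cons_of_mem _ hbt, hbs⟩
      · rcases pvUpd_cases s best a with he | ⟨has, he, _⟩
        · exact Or.inr (he ▸ heq)
        · rw [he] at heq; cases heq
          exact Or.inl ⟨List.mem_cons_self, has⟩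
    · intro b x h hx
      rw [hfold] at h
      rcases hx with ⟨hxm, hxs⟩ | hbx
      · rcases List.mem_cons.1 hxm with rfl | hxt
        · cases hbest : best with
          | none =>
            have hint : pvUpd s best x = some x := by rw [hbest]; exact pvUpd_none s x hxs
            have := ih2 b x h (Or.inr hint)
            omega
          | some b0 =>
            rcases pvUpd_cases s best x with he | ⟨_, he, _⟩
            · -- pvUpd = best = some b0; x ∈ s so ¬(x < b0) i.e. b0 ≤ x
              have hble : b0 ≤ x := by
                by_contra hgt
                rw [hbest] at he
                simp [pvUpd, PySem.Set.contains, hxs, show x < b0 by omega] at he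
                omega
              have := ih2 b b0 h (Or.inr (he.trans hbest))
              omega
            · have := ih2 b x h (Or.inr he)
              omega
        · exact ih2 b x h (Or.inl ⟨hxt, hxs⟩)
      · rcases pvUpd_cases s best a with he | ⟨has, he, hlt⟩
        · exact ih2 b x h (Or.inr (he.trans hbx))
        · have hax : a < x := hlt x hbx
          have := ih2 b a h (Or.inr he)
          omega
    · intro h
      rw [hfold] at h
      obtain ⟨h1, h2⟩ := ih3 h
      rcases pvUpd_cases s best a with he | ⟨has, he, _⟩
      · rw [he] at h1
        refine ⟨h1, ?_⟩
        intro x hx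
        rcases List.mem_cons.1 hx with rfl | hxt
        · intro hs
          rw [h1] at he
          rw [pvUpd_none s x hs] at he
          cases he
        · exact h2 x hxt
      · rw [he] at h1; cases h1


def pvCand (a d x : Int) : Prop :=
  ∃ k, d ≤ k ∧ k * k ≤ a ∧ k ∣ a ∧
    (x = k ∨ x = -k ∨ x = PySem.Int.floordiv a k ∨ x = -(PySem.Int.floordiv a k))

theorem pvCand_none {a d x : Int} (hd : 1 ≤ d) (hdd : ¬ d * d ≤ a) : ¬ pvCand a d x := by
  rintro ⟨k, hk1, hk2, _, _⟩
  have : d * d ≤ k * k := by nlinarith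
  omega

theorem pvCand_step {a d : Int} (hd : 1 ≤ d) (hdd : d * d ≤ a) (x : Int) :
    pvCand a d x ↔
      (PySem.Int.mod a d = 0 ∧
        (x = -(PySem.Int.floordiv a d) ∨ x = -d ∨ x = d ∨ x = PySem.Int.floordiv a d)) ∨
      pvCand a (d + 1) x := by
  constructor
  · rintro ⟨k, hk1, hk2, hk3, hk4⟩
    by_cases hkd : k = d
    · subst hkd
      exact Or.inl ⟨(PySem.Int.mod_eq_zero_iff_dvd a k).2 hk3, by tauto⟩
    · exact Or.inr ⟨k, by omega, hk2, hk3, hk4⟩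
  · rintro (⟨hm, hx⟩ | ⟨k, hk1, hk2, hk3, hk4⟩)
    · exact ⟨d, le_refl d, hdd, (PySem.Int.mod_eq_zero_iff_dvd a d).1 hm, by tauto⟩
    · exact ⟨k, by omega, hk2, hk3, hk4⟩


theorem pvLoop_spec (a : Int) (s : PySem.Set Int) :
    ∀ n d, (a + 1 - d).toNat = n → 1 ≤ d → ∀ best,
    (∀ b, pvLoop a s d best = some b → ((b ∈ s ∧ pvCand a d b) ∨ best = some b)) ∧
    (∀ b x, pvLoop a s d best = some b → ((x ∈ s ∧ pvCand a d x) ∨ best = some x) → b ≤ x) ∧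
    (pvLoop a s d best = none → best = none ∧ ∀ x ∈ s, ¬ pvCand a d x) := by
  intro n
  induction n using Nat.strong_induction_on with
  | _ n ih =>
    intro d hn hd best
    by_cases hdd : d * d ≤ a
    · have hda : d ≤ a := by nlinarith
      have hlt : (a + 1 - (d + 1)).toNat < n := by omega
      set L : List Int := [-(PySem.Int.floordiv a d), -d, d, PySem.Int.floordiv a d] with hL
      set best' : Option Int :=
        (if PySem.Int.mod a d = 0 then L.foldl (pvUpd s) best else best) with hbest'
      have hloop : pvLoop a s d best = pvLoop a s (d + 1) best' := by
        rw [pvLoop, if_pos hdd, hbest', hL]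
      obtain ⟨ih1, ih2, ih3⟩ := ih _ hlt (d + 1) rfl (by omega) best'
      obtain ⟨fs1, fs2, fs3⟩ := pvFoldUpd_spec s L best
      -- transfer facts about best'
      have hb'1 : ∀ b, best' = some b →
          (b ∈ s ∧ PySem.Int.mod a d = 0 ∧ b ∈ L) ∨ best = some b := by
        intro b hb
        rw [hbest'] at hb
        by_cases hm : PySem.Int.mod a d = 0
        · rw [if_pos hm] at hb
          rcases fs1 b hb with ⟨hbl, hbs⟩ | h' <;> tauto
        · rw [if_neg hm] at hb; exact Or.inr hb
      have hb'2 : ∀ b x, best' = some b →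
          ((x ∈ L ∧ x ∈ s ∧ PySem.Int.mod a d = 0) ∨ best = some x) → b ≤ x := by
        intro b x hb hx
        rw [hbest'] at hb
        by_cases hm : PySem.Int.mod a d = 0
        · rw [if_pos hm] at hb
          rcases hx with ⟨h1, h2, _⟩ | h'
          · exact fs2 b x hb (Or.inl ⟨h1, h2⟩)
          · exact fs2 b x hb (Or.inr h')
        · rw [if_neg hm] at hb
          rcases hx with ⟨_, _, hm'⟩ | h'
          · exact absurd hm' hm
          · rw [hb] at h'; cases h'; exact le_refl _
      have hb'3 : best' = none → best = none ∧ (PySem.Int.mod a d = 0 → ∀ x ∈ L, x ∉ s) := by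
        intro hb
        rw [hbest'] at hb
        by_cases hm : PySem.Int.mod a d = 0
        · rw [if_pos hm] at hb
          obtain ⟨h1, h2⟩ := fs3 hb
          exact ⟨h1, fun _ => h2⟩
        · rw [if_neg hm] at hb; exact ⟨hb, fun h => absurd h hm⟩
      refine ⟨?_, ?_, ?_⟩
      · intro b hb
        rw [hloop] at hb
        rcases ih1 b hb with ⟨hbs, hbc⟩ | h'
        · exact Or.inl ⟨hbs, (pvCand_step hd hdd b).2 (Or.inr hbc)⟩
        · rcases hb'1 b h' with ⟨hbs, hm, hbl⟩ | h''
          · refine Or.inl ⟨hbs, (pvCand_step hd hdd b).2 (Or.inl ⟨hm, ?_⟩)⟩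
            simpa [hL] using hbl
          · exact Or.inr h''
      · intro b x hb hx
        rw [hloop] at hb
        rcases hx with ⟨hxs, hxc⟩ | hbx
        · rcases (pvCand_step hd hdd x).1 hxc with ⟨hm, hxl⟩ | hxc'
          · -- x is one of this round's candidates
            have hxL : x ∈ L := by simp [hL]; tauto
            cases hbest2 : best' with
            | none =>
              obtain ⟨_, h2⟩ := hb'3 hbest2
              exact absurd hxs (h2 hm x hxL)
            | some m =>
              have hmx : m ≤ x := hb'2 m x hbest2 (Or.inl ⟨hxL, hxs, hm⟩)
              have := ih2 b m hb (Or.inr hbest2)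
              omega
          · exact ih2 b x hb (Or.inl ⟨hxs, hxc'⟩)
        · cases hbest2 : best' with
          | none => exact absurd ((hb'3 hbest2).1.symm.trans hbx) (by simp)
          | some m =>
            have hmx : m ≤ x := hb'2 m x hbest2 (Or.inr hbx)
            have := ih2 b m hb (Or.inr hbest2)
            omega
      · intro hb
        rw [hloop] at hb
        obtain ⟨h1, h2⟩ := ih3 hb
        obtain ⟨h3, h4⟩ := hb'3 h1
        refine ⟨h3, ?_⟩
        intro x hxs hxc
        rcases (pvCand_step hd hdd x).1 hxc with ⟨hm, hxl⟩ | hxc'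
        · exact (h4 hm x (by simp [hL]; tauto)) hxs
        · exact (h2 x hxs) hxc'
    · have hloop : pvLoop a s d best = best := by rw [pvLoop]; simp [hdd]
      refine ⟨?_, ?_, ?_⟩
      · intro b hb; exact Or.inr (hloop ▸ hb)
      · intro b x hb hx
        rcases hx with ⟨_, hxc⟩ | hbx
        · exact absurd hxc (pvCand_none hd hdd)
        · rw [hloop, hbx] at hb; cases hb; exact le_refl _
      · intro hb
        exact ⟨hloop ▸ hb, fun x _ => pvCand_none hd hdd⟩


theorem pvCand_iff {a x : Int} (ha : 1 ≤ a) : pvCand a 1 x ↔ x ≠ 0 ∧ x ∣ a := by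
  constructor
  · rintro ⟨k, hk1, hk2, hk3, hx⟩
    have hk0 : 0 < k := by omega
    have hq : a / k * k = a := Int.ediv_mul_cancel hk3
    have hfd : PySem.Int.floordiv a k = a / k := PySem.Int.floordiv_eq_ediv_of_pos hk0
    have hqd : a / k ∣ a := Dvd.intro k (by linarith [hq])
    have hq0 : a / k ≠ 0 := by
      intro h0; rw [h0] at hq; omega
    rcases hx with rfl | rfl | rfl | rfl
    · exact ⟨by omega, hk3⟩
    · exact ⟨by omega, (neg_dvd).2 hk3⟩
    · rw [hfd]; exact ⟨hq0, hqd⟩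
    · rw [hfd]; exact ⟨by simpa using hq0, hqd.neg_left⟩
  · rintro ⟨hx0, hxd⟩
    have he1 : 1 ≤ |x| := Int.one_le_abs (by omega)
    have hed : |x| ∣ a := (abs_dvd x a).2 hxd
    have hea : |x| ≤ a := Int.le_of_dvd (by omega) hed
    have hxe : x = |x| ∨ x = -|x| := by
      rcases abs_choice x with h | h
      · exact Or.inl h.symm
      · have := abs_nonneg x
        exact Or.inr (by omega)
    by_cases hee : |x| * |x| ≤ a
    · exact ⟨|x|, he1, hee, hed, by rcases hxe with h | h <;> tauto⟩
    · set q := a / |x| with hqdef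
      have hq : q * |x| = a := Int.ediv_mul_cancel hed
      have hq1 : 1 ≤ q := by nlinarith
      have hqe : q < |x| := by nlinarith
      have hqq : q * q ≤ a := by nlinarith
      have hqd : q ∣ a := Dvd.intro |x| (by linarith [hq])
      have hfd : PySem.Int.floordiv a q = a / q := PySem.Int.floordiv_eq_ediv_of_pos (by omega)
      have haq : a / q = |x| := by
        rw [← hq]; exact Int.mul_ediv_cancel_left _ (by omega)
      refine ⟨q, hq1, hqq, hqd, ?_⟩
      rw [hfd, haq]
      rcases hxe with h | h <;> tauto


theorem pvB_isM {effort : List Int} (hpre : Pre_minimize_total_effort effort)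
    {v : Int} (hv : v ∈ effort) {c : Int} (hc : pvIsM v effort c) :
    (if v = 0 then (PySem.List.min? (PySem.Set.ofList effort) (fun x => x)).getD 0
     else (pvLoop (if v < 0 then -v else v) (PySem.Set.ofList effort) 1 none).getD 0) = c := by
  obtain ⟨hc1, hc2, hc3, hc4⟩ := hc
  set s := PySem.Set.ofList effort with hs
  have hmem : ∀ x : Int, x ∈ s ↔ x ∈ effort := fun x => PySem.Set.mem_ofList effort x
  by_cases hv0 : v = 0
  · subst hv0
    rw [if_pos rfl]
    cases hmin : PySem.List.min? s (fun x => x) with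
    | none =>
      exfalso
      have := (PySem.List.min?_eq_none_iff s (fun x : Int => x)).1 hmin
      rw [this] at hmem
      simpa using (hmem 0).2 hv
    | some m =>
      have hm1 : m ∈ effort := (hmem m).1 (PySem.List.min?_mem hmin)
      have hm2 : ∀ y ∈ s, m ≤ y := fun y hy => PySem.List.min?_isMin hmin y hy
      obtain ⟨n, hn, hnneg, _⟩ := hpre hv 0 hv
      have hmn : m ≤ n := hm2 n ((hmem n).2 hn)
      have hm0 : m ≠ 0 := by omega
      have h1 : c ≤ m := hc4 m hm1 hm0 (dvd_zero m)
      have h2 : m ≤ c := hm2 c ((hmem c).2 hc1)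
      simp; omega
  · rw [if_neg hv0]
    set a : Int := if v < 0 then -v else v with ha
    have ha1 : 1 ≤ a := by rw [ha]; split <;> omega
    have hav : ∀ x : Int, x ∣ a ↔ x ∣ v := by
      intro x; rw [ha]; split
      · exact dvd_neg
      · exact Iff.rfl
    obtain ⟨sp1, sp2, sp3⟩ := pvLoop_spec a s (a + 1 - 1).toNat 1 rfl (le_refl 1) none
    cases hr : pvLoop a s 1 none with
    | none =>
      exfalso
      obtain ⟨_, h2⟩ := sp3 hr
      exact h2 v ((hmem v).2 hv) ((pvCand_iff ha1).2 ⟨hv0, (hav v).2 dvd_rfl⟩)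
    | some b =>
      rcases sp1 b hr with ⟨hbs, hbc⟩ | h' ; swap
      · cases h'
      obtain ⟨hb0, hba⟩ := (pvCand_iff ha1).1 hbc
      have hbv : b ∣ v := (hav b).1 hba
      have h1 : c ≤ b := hc4 b ((hmem b).1 hbs) hb0 hbv
      have h2 : b ≤ c :=
        sp2 b c hr (Or.inl ⟨(hmem c).2 hc1, (pvCand_iff ha1).2 ⟨hc2, (hav c).2 hc3⟩⟩)
      simp; omega

theorem pvMain {effort : List Int} (hpre : Pre_minimize_total_effort effort) :
    ∀ l : List Int, (∀ v ∈ l, v ∈ effort) → ∀ (acc : List Int) (t0 : Int), t0 = acc.sum →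
    (List.foldl (fun acc v =>
      match pvFirstDiv v (PySem.List.sorted effort (fun x => x) false) with
      | some c => acc ++ [c]
      | none => acc) acc l).sum =
    List.foldl (fun total v =>
      if v = 0 then total + (PySem.List.min? (PySem.Set.ofList effort) (fun x => x)).getD 0
      else
        let a := if v < 0 then -v else v
        total + (pvLoop a (PySem.Set.ofList effort) 1 none).getD 0) t0 l := by
  intro l
  induction l with
  | nil => intro _ acc t0 ht; simpa using ht.symm
  | cons v t ih =>
    intro hsub acc t0 ht
    obtain ⟨c, hfd, hisM⟩ := pvA_isM hpre (hsub v List.mem_cons_self)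
    have hB := pvB_isM hpre (hsub v List.mem_cons_self) hisM
    simp only [List.foldl_cons, hfd]
    have hstep : (if v = 0 then t0 + (PySem.List.min? (PySem.Set.ofList effort) (fun x => x)).getD 0
      else
        let a := if v < 0 then -v else v
        t0 + (pvLoop a (PySem.Set.ofList effort) 1 none).getD 0) = t0 + c := by
      by_cases hv0 : v = 0
      · rw [if_pos hv0] at hB ⊢; omega
      · rw [if_neg hv0] at hB ⊢; simp only [] at hB ⊢; omega
    rw [hstep]
    exact ih (fun x hx => hsub x (List.mem_cons_of_mem _ hx)) (acc ++ [c]) (t0 + c)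
      (by simp [ht])

theorem pvEqual (effort : List Int) (hpre : Pre_minimize_total_effort effort) :
    minimize_total_effort effort = minimize_total_effort_alt effort := by
  unfold minimize_total_effort minimize_total_effort_alt
  exact pvMain hpre effort (fun _ h => h) [] 0 rfl

-- ===== VERDICT (by name: the statement is the Claim_ definition above) =====
theorem minimize_total_effort_spec : Claim_equal_minimize_total_effort := by
  intro effort _ hpre
  unfold Spec_minimize_total_effort
  exact pvEqual effort hpre
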